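-- pv_equiv track=rewrite | github.com/teo-georgiev/mooc-programming-23 | part04-11_first_second_last/src/first_second_last.py | second_word
-- ===== SOURCE A (Python) =====
-- def second_word(sentence: str):
--     index = 0
--     textSecond = ""
--
--     space = sentence.find(" ")
--     sentence = sentence[space + 1 : ]
--
--     if sentence.find(" ") == -1 :
--         textSecond = sentence
--         return textSecond
--     else:
--         while sentence[index] != " ":
--             textSecond += sentence[index]
--             index += 1
--
--     return textSecond
-- ===== SOURCE B (Python) =====
-- def second_word(sentence: str):
--     words = sentence.split(" ")
--     return words[1] if len(words) > 1 else words[0]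
-- ===== Notes on version B (the rewrite author's own statement) =====
-- stated objective: idiomatic
-- what changed: A's two find() calls, a manual slice and a char-by-char while-loop accumulator are replaced by one split(" ") into a word list followed by indexing (words[1], falling back to words[0] when there is no space).
import Mathlib
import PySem

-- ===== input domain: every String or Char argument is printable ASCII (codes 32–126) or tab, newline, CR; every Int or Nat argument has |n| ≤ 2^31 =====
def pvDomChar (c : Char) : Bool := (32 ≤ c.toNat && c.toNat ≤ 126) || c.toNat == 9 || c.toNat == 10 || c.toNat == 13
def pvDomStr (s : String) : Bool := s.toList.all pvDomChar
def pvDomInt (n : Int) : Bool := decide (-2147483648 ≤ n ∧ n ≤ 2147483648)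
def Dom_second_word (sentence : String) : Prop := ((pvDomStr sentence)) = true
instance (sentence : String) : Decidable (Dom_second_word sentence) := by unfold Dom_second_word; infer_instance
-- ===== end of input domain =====

-- B replaces A's two find calls plus a manual char-by-char while loop with a single
-- split(" ") followed by indexing (idiomatic; same asymptotic cost).

-- ===== PORT A =====
-- A's while loop: accumulate characters until the next space (the branch that runs it
-- is guarded by a space existing, so the [] case is unreachable there)
def pvSecondLoop : List Char → List Char
  | [] => []
  | c :: rest => if c = ' ' then [] else c :: pvSecondLoop rest

def second_word (sentence : String) : String :=
  let space := PySem.Str.find sentence " "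
  let sentence2 := PySem.Str.slice sentence (some (space + 1)) none
  if PySem.Str.find sentence2 " " = -1 then sentence2
  else String.ofList (pvSecondLoop sentence2.toList)

-- ===== PORT B =====
def second_word_alt (sentence : String) : String :=
  match PySem.Str.split? sentence " " with
  | none => ""   -- unreachable: the separator " " is nonempty
  | some words =>
      if words.length > 1 then (PySem.List.pyGet? words 1).getD ""
      else (PySem.List.pyGet? words 0).getD ""

-- ===== PRECONDITION & SPEC =====
def Spec_second_word (sentence : String) (out : String) : Prop := out = second_word_alt sentence
instance (sentence : String) (out : String) : Decidable (Spec_second_word sentence out) := by unfold Spec_second_word; infer_instance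

-- ===== CLAIM (what is proved, stated in full; the proofs are below) =====
def Claim_equal_second_word : Prop := ∀ (sentence : String), Dom_second_word sentence → Spec_second_word sentence (second_word sentence)

-- ===== LEMMAS AND PROOFS =====

-- find with a single-char needle is first-occurrence search
theorem pv_find_go_space (cs : List Char) : ∀ (k : Nat),
    PySem.Chars.find.go [' '] cs k = if ' ' ∈ cs then ((k + cs.idxOf ' ' : Nat) : Int) else -1 := by
  induction cs with
  | nil => intro k; simp [PySem.Chars.find.go]
  | cons c rest ih =>
    intro k
    by_cases hc : c = ' '
    · subst hc; simp [PySem.Chars.find.go, List.isPrefixOf]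
    · simp [PySem.Chars.find.go, List.isPrefixOf, hc, ih (k + 1)]
      by_cases hm : ' ' ∈ rest
      · simp [hm, Ne.symm hc]; ring
      · simp [hm, Ne.symm hc]

theorem pv_find_space (cs : List Char) :
    PySem.Chars.find cs [' '] = if ' ' ∈ cs then ((cs.idxOf ' ' : Nat) : Int) else -1 := by
  simpa using pv_find_go_space cs 0

-- the tail-recursive core of splitOn on a single-char separator, de-fueled
def pvSh : List Char → List Char → List (List Char)
  | [], cur => [cur.reverse]
  | c :: rest, cur => if c = ' ' then cur.reverse :: pvSh rest [] else pvSh rest (c :: cur)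

theorem pv_splitOn_go_spec : ∀ (fuel : Nat) (l cur : List Char) (acc : List (List Char)),
    l.length < fuel →
    PySem.Chars.splitOn.go [' '] fuel l cur acc = acc.reverse ++ pvSh l cur := by
  intro fuel
  induction fuel with
  | zero => intro l cur acc h; omega
  | succ n ih =>
    intro l cur acc h
    cases l with
    | nil => simp [PySem.Chars.splitOn.go, pvSh]
    | cons c rest =>
      by_cases hc : c = ' '
      · subst hc
        simp only [PySem.Chars.splitOn.go, List.isPrefixOf, beq_self_eq_true, Bool.and_eq_true,
          and_self, if_pos]
        rw [ih _ _ _ (by simpa using Nat.lt_of_succ_lt_succ h)]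
        simp [pvSh]
      · have hpre : [' '].isPrefixOf (c :: rest) = false := by
          simp [List.isPrefixOf, Ne.symm hc]
        simp only [PySem.Chars.splitOn.go, hpre, Bool.false_eq_true, if_neg, not_false_iff]
        rw [ih _ _ _ (by simpa using Nat.lt_of_succ_lt_succ h)]
        simp [pvSh, hc]

theorem pv_splitOn_space (cs : List Char) :
    PySem.Chars.splitOn cs [' '] = pvSh cs [] := by
  unfold PySem.Chars.splitOn
  rw [pv_splitOn_go_spec _ _ _ _ (by omega)]
  simp

theorem pvSh_no_space (cs : List Char) : ∀ (cur : List Char), ' ' ∉ cs →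
    pvSh cs cur = [cur.reverse ++ cs] := by
  induction cs with
  | nil => intro cur h; simp [pvSh]
  | cons c rest ih =>
    intro cur h
    have hc : c ≠ ' ' := by intro hc; exact h (by simp [hc])
    have hr : ' ' ∉ rest := fun hm => h (by simp [hm])
    simp [pvSh, hc, ih _ hr]

theorem pvSh_space (cs : List Char) : ∀ (cur : List Char), ' ' ∈ cs →
    pvSh cs cur = (cur.reverse ++ cs.takeWhile (· ≠ ' ')) :: pvSh (cs.drop (cs.idxOf ' ' + 1)) [] := by
  induction cs with
  | nil => intro cur h; simp at h
  | cons c rest ih =>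
    intro cur h
    by_cases hc : c = ' '
    · subst hc; simp [pvSh, List.takeWhile]
    · have hr : ' ' ∈ rest := by
        rcases List.mem_cons.mp h with h1 | h1
        · exact absurd h1.symm hc
        · exact h1
      rw [List.idxOf_cons]
      simp only [pvSh, if_neg hc]
      rw [ih _ hr]
      simp [List.takeWhile, hc, Bool.cond_eq_ite]

theorem pvSecondLoop_eq (cs : List Char) : pvSecondLoop cs = cs.takeWhile (· ≠ ' ') := by
  induction cs with
  | nil => simp [pvSecondLoop]
  | cons c rest ih =>
    by_cases hc : c = ' '
    · simp [pvSecondLoop, hc, List.takeWhile]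
    · simp [pvSecondLoop, hc, List.takeWhile, ih]

-- ===== VERDICT (by name: the statement is the Claim_ definition above) =====
theorem second_word_spec : Claim_equal_second_word := by
  intro sentence _
  unfold Spec_second_word second_word second_word_alt
  have hsep : (" " : String).toList = [' '] := rfl
  simp only [PySem.Str.split?, PySem.Chars.split?, hsep, List.isEmpty_cons, if_neg,
    Bool.false_eq_true, not_false_iff, Option.map_some]
  rw [pv_splitOn_space]
  set cs := sentence.toList with hcs
  by_cases h1 : ' ' ∈ cs
  · -- a first space exists: A drops through it, B's words list has ≥ 2 entries
    have hfind : PySem.Str.find sentence " " = ((cs.idxOf ' ' : Nat) : Int) := by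
      simp [PySem.Str.find, hsep, ← hcs, pv_find_space, h1]
    rw [hfind]
    have hslice : PySem.Str.slice sentence (some (((cs.idxOf ' ' : Nat) : Int) + 1)) none
        = String.ofList (cs.drop (cs.idxOf ' ' + 1)) := by
      simp only [PySem.Str.slice, PySem.Chars.slice_eq_listSlice, ← hcs]
      congr 1
      have : (((cs.idxOf ' ' : Nat) : Int) + 1) = (((cs.idxOf ' ' + 1 : Nat)) : Int) := by push_cast; ring
      rw [this, PySem.List.slice_from_natCast]
    rw [hslice]
    set rest := cs.drop (cs.idxOf ' ' + 1) with hrest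
    rw [pvSh_space cs [] h1]
    by_cases h2 : ' ' ∈ rest
    · -- rest also has a space: A's while loop, B's words[1] head word of rest
      have hf2 : PySem.Str.find (String.ofList rest) " " ≠ -1 := by
        simp [PySem.Str.find, hsep, pv_find_space, h2]
      rw [if_neg hf2]
      rw [pvSh_space rest [] h2]
      norm_num [pvSecondLoop_eq, PySem.List.pyGet?, PySem.List.pyIdx?]
    · -- rest has no space: A returns rest whole, B's words = [first, rest]
      have hf2 : PySem.Str.find (String.ofList rest) " " = -1 := by
        simp [PySem.Str.find, hsep, pv_find_space, h2]
      rw [if_pos hf2]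
      rw [pvSh_no_space rest [] h2]
      norm_num [PySem.List.pyGet?, PySem.List.pyIdx?]
  · -- no space at all: A returns the sentence unchanged, B returns words[0]
    have hfind : PySem.Str.find sentence " " = -1 := by
      simp [PySem.Str.find, hsep, ← hcs, pv_find_space, h1]
    rw [hfind]
    have hslice : PySem.Str.slice sentence (some ((-1 : Int) + 1)) none = String.ofList cs := by
      norm_num [PySem.Str.slice, PySem.Chars.slice_eq_listSlice, ← hcs, PySem.List.slice_zero_start,
        PySem.List.slice_none_none]
    rw [hslice]
    have hf2 : PySem.Str.find (String.ofList cs) " " = -1 := by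
      simp [PySem.Str.find, hsep, pv_find_space, h1]
    rw [if_pos hf2]
    rw [pvSh_no_space cs [] h1]
    norm_num [PySem.List.pyGet?, PySem.List.pyIdx?]
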